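-- pv_equiv track=rewrite | github.com/Wribbe/132eda | ass3.py | matrix_get_coords_cicle
-- ===== SOURCE A (Python) =====
-- def matrix_get_coords_cicle(columns, rows, x, y, offset):
--     tile_list = set()
--     for outer_row in [y+offset, y-offset]:
--         for intermediate_column in range(x-offset, x+offset+1):
--             tile_list.add((intermediate_column, outer_row))
--     for outer_column in [x+offset, x-offset]:
--         for intermediate_row in range(y-offset, y+offset+1):
--             tile_list.add((outer_column, intermediate_row))
--     # Sanitize coordinates.
--     coords = sorted(set([(x, y) for (x,y) in tile_list if not (x < 0 or y < 0)
--         and not (x >= columns or y >= rows)]))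
--     return coords
-- ===== SOURCE B (Python) =====
-- def matrix_get_coords_cicle(columns, rows, x, y, offset):
--     # Walk the ring of Chebyshev distance `offset` around (x, y) directly in
--     # lexicographic order: columns left to right; for the two extreme columns
--     # take every row of the ring, for the middle columns only the top and
--     # bottom rows.  In-bounds filtering happens inline; no set, no sort.
--     coords = []
--     for dx in range(-offset, offset + 1):
--         col = x + dx
--         if col < 0 or col >= columns:
--             continue
--         if abs(dx) == offset:
--             dys = range(-offset, offset + 1)
--         else:
--             dys = (-offset, offset)
--         for dy in dys:
--             row = y + dy
--             if 0 <= row < rows: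
--                 coords.append((col, row))
--     return coords
-- ===== Notes on version B (the rewrite author's own statement) =====
-- stated objective: faster
-- what changed: Replaces A's four edge-construction loops plus set-dedup plus sort by a single column sweep that emits the ring points directly in lexicographic order (full row range only at the two extreme columns, just the top/bottom rows in between), so no set and no sort are needed.
import Mathlib
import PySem

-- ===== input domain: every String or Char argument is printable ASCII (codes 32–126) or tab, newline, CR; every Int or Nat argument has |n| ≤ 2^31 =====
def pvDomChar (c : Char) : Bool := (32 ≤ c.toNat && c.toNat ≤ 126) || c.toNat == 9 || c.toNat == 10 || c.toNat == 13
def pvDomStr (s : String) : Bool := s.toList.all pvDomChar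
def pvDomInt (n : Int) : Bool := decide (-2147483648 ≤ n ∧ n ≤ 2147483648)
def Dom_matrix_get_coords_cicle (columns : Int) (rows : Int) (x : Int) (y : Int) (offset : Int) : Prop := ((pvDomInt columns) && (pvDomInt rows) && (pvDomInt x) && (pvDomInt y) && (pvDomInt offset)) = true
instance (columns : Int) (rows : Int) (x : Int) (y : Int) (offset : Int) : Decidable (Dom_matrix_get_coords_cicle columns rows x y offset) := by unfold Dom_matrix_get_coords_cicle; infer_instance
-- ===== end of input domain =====

-- B replaces A's four edge loops + set dedup + sort by one column sweep emitting the ring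
-- already in lexicographic order (objective: faster — no set and no sort; measured faster in a timing run).

-- ===== PORT A =====
-- Python's `tile_list` is a hash set with O(1) insertion whose iteration order is not modelled;
-- here it is consumed only through `sorted(set(...))`, which is order-independent, so the port
-- keeps the same insertion loops over a tree set of the same tuples (exact as a set) and the
-- final `set(...)`/`sorted(...)` are the PySem primitives.
def pvTupleCmp : (Int × Int) → (Int × Int) → Ordering :=
  compareLex (compareOn Prod.fst) (compareOn Prod.snd)

def matrix_get_coords_cicle (columns : Int) (rows : Int) (x : Int) (y : Int) (offset : Int) : List (Int × Int) :=
  let tile_list : Std.TreeSet (Int × Int) pvTupleCmp :=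
    [y + offset, y - offset].foldl (fun s outer_row =>
      (PySem.List.pyRange (x - offset) (x + offset + 1)).foldl
        (fun s intermediate_column => s.insert (intermediate_column, outer_row)) s)
      Std.TreeSet.empty
  let tile_list : Std.TreeSet (Int × Int) pvTupleCmp :=
    [x + offset, x - offset].foldl (fun s outer_column =>
      (PySem.List.pyRange (y - offset) (y + offset + 1)).foldl
        (fun s intermediate_row => s.insert (outer_column, intermediate_row)) s)
      tile_list
  -- Sanitize coordinates.
  let coords := PySem.List.sorted2
    (PySem.Set.ofList (tile_list.toList.filter
      (fun p => decide (¬ (p.1 < 0 ∨ p.2 < 0) ∧ ¬ (p.1 ≥ columns ∨ p.2 ≥ rows)))))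
    Prod.fst Prod.snd
  coords

-- ===== PORT B =====
def matrix_get_coords_cicle_alt (columns : Int) (rows : Int) (x : Int) (y : Int) (offset : Int) : List (Int × Int) :=
  (PySem.List.pyRange (-offset) (offset + 1)).foldl (fun coords dx =>
    if x + dx < 0 ∨ x + dx ≥ columns then coords
    else
      (if |dx| = offset then PySem.List.pyRange (-offset) (offset + 1)
       else [-offset, offset]).foldl (fun coords dy =>
        if 0 ≤ y + dy ∧ y + dy < rows then coords ++ [(x + dx, y + dy)] else coords) coords) []

-- ===== PRECONDITION & SPEC =====
def Spec_matrix_get_coords_cicle (columns : Int) (rows : Int) (x : Int) (y : Int) (offset : Int) (out : List (Int × Int)) : Prop := out = matrix_get_coords_cicle_alt columns rows x y offset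
instance (columns : Int) (rows : Int) (x : Int) (y : Int) (offset : Int) (out : List (Int × Int)) : Decidable (Spec_matrix_get_coords_cicle columns rows x y offset out) := by unfold Spec_matrix_get_coords_cicle; infer_instance

-- ===== CLAIM (what is proved, stated in full; the proofs are below) =====
def Claim_equal_matrix_get_coords_cicle : Prop := ∀ (columns : Int) (rows : Int) (x : Int) (y : Int) (offset : Int), Dom_matrix_get_coords_cicle columns rows x y offset → Spec_matrix_get_coords_cicle columns rows x y offset (matrix_get_coords_cicle columns rows x y offset)

-- ===== LEMMAS AND PROOFS =====

-- Python's default tuple sort is the sort by the lexicographic key.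
theorem pv_sorted2_eq_sorted_lex (xs : List (Int × Int)) :
    PySem.List.sorted2 xs Prod.fst Prod.snd =
      PySem.List.sorted xs (fun p => (toLex p : Lex (Int × Int))) := by
  rw [PySem.List.sorted_eq_foldl_insertBy]
  show xs.foldl (fun acc x => PySem.List.insertBy _ x acc) [] = _
  congr 1
  funext acc p
  congr 1
  funext a b
  rw [if_neg (by simp), Bool.eq_iff_iff]
  simp only [Bool.or_eq_true, Bool.and_eq_true, Bool.not_eq_true', decide_eq_true_eq,
    decide_eq_false_iff_not, Prod.Lex.toLex_lt_toLex]
  omega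

theorem pv_pyRange_pairwise (a b : Int) :
    (PySem.List.pyRange a b).Pairwise (· < ·) := by
  rw [PySem.List.pyRange_of_pos a b (by norm_num : (0:Int) < 1)]
  rw [List.pairwise_map]
  exact List.pairwise_lt_range.imp (by intro i j h; omega)

theorem pv_cmp_eq_iff (p q : Int × Int) : pvTupleCmp p q = Ordering.eq ↔ p = q := by
  unfold pvTupleCmp
  simp only [compareLex, compareOn, Ordering.then_eq_eq, Int.compare_eq_eq]
  constructor
  · rintro ⟨h1, h2⟩; exact Prod.ext h1 h2
  · rintro rfl; exact ⟨rfl, rfl⟩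

theorem pv_mem_insert (t : Std.TreeSet (Int × Int) pvTupleCmp) (a b : Int × Int) :
    a ∈ t.insert b ↔ a = b ∨ a ∈ t := by
  haveI : Std.TransCmp pvTupleCmp := by unfold pvTupleCmp; infer_instance
  rw [Std.TreeSet.mem_insert, pv_cmp_eq_iff]
  exact or_congr_left eq_comm

theorem pv_mem_toList (t : Std.TreeSet (Int × Int) pvTupleCmp) (a : Int × Int) :
    a ∈ t.toList ↔ a ∈ t := by
  haveI : Std.TransCmp pvTupleCmp := by unfold pvTupleCmp; infer_instance
  haveI : Std.ReflCmp pvTupleCmp := ⟨fun {a} => (pv_cmp_eq_iff a a).mpr rfl⟩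
  haveI : Std.LawfulEqCmp pvTupleCmp := ⟨fun {a b} h => (pv_cmp_eq_iff a b).mp h⟩
  exact Std.TreeSet.mem_toList

theorem pv_not_mem_empty (a : Int × Int) :
    a ∉ (Std.TreeSet.empty : Std.TreeSet (Int × Int) pvTupleCmp) := by
  haveI : Std.TransCmp pvTupleCmp := by unfold pvTupleCmp; infer_instance
  simp

theorem pv_mem_foldl_ins {β : Type} (l : List β) (f : β → Int × Int)
    (s : Std.TreeSet (Int × Int) pvTupleCmp) (m : Int × Int) :
    m ∈ l.foldl (fun s b => s.insert (f b)) s ↔ m ∈ s ∨ ∃ b ∈ l, m = f b := by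
  induction l generalizing s with
  | nil => simp
  | cons hd tl ih =>
    simp only [List.foldl_cons, ih, pv_mem_insert, List.mem_cons]
    constructor
    · rintro (⟨h | h⟩ | ⟨b, hb, rfl⟩)
      · exact Or.inr ⟨hd, Or.inl rfl, h⟩
      · exact Or.inl h
      · exact Or.inr ⟨b, Or.inr hb, rfl⟩
    · rintro (h | ⟨b, (rfl | hb), rfl⟩)
      · exact Or.inl (Or.inr h)
      · exact Or.inl (Or.inl rfl)
      · exact Or.inr ⟨b, hb, rfl⟩

theorem pv_mem_foldl_ins2 (l1 l2 : List Int) (f : Int → Int → Int × Int)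
    (s : Std.TreeSet (Int × Int) pvTupleCmp) (m : Int × Int) :
    m ∈ l1.foldl (fun s a => l2.foldl (fun s b => s.insert (f a b)) s) s ↔
      m ∈ s ∨ ∃ a ∈ l1, ∃ b ∈ l2, m = f a b := by
  induction l1 generalizing s with
  | nil => simp
  | cons hd tl ih =>
    simp only [List.foldl_cons, ih, pv_mem_foldl_ins, List.mem_cons]
    constructor
    · rintro (⟨h | ⟨b, hb, rfl⟩⟩ | ⟨a, ha, b, hb, rfl⟩)
      · exact Or.inl h
      · exact Or.inr ⟨hd, Or.inl rfl, b, hb, rfl⟩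
      · exact Or.inr ⟨a, Or.inr ha, b, hb, rfl⟩
    · rintro (h | ⟨a, (rfl | ha), b, hb, rfl⟩)
      · exact Or.inl (Or.inl h)
      · exact Or.inl (Or.inr ⟨b, hb, rfl⟩)
      · exact Or.inr ⟨a, ha, b, hb, rfl⟩

-- B's per-column block, as an explicit list.
def pvColBlock (columns : Int) (rows : Int) (x : Int) (y : Int) (offset : Int) (dx : Int) :
    List (Int × Int) :=
  if x + dx < 0 ∨ x + dx ≥ columns then []
  else
    ((if |dx| = offset then PySem.List.pyRange (-offset) (offset + 1)
      else [-offset, offset]).filter (fun dy => decide (0 ≤ y + dy ∧ y + dy < rows))).map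
      (fun dy => (x + dx, y + dy))

theorem pv_alt_eq_flatMap (columns rows x y offset : Int) :
    matrix_get_coords_cicle_alt columns rows x y offset =
      (PySem.List.pyRange (-offset) (offset + 1)).flatMap
        (pvColBlock columns rows x y offset) := by
  unfold matrix_get_coords_cicle_alt
  rw [PySem.List.foldl_congr_mem (g := fun acc dx => acc ++ pvColBlock columns rows x y offset dx)]
  · exact PySem.List.foldl_append_eq_flatMap _ _ _
  · intro acc dx _
    unfold pvColBlock
    by_cases h : x + dx < 0 ∨ x + dx ≥ columns
    · simp [h]
    · simp only [h, if_false]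
      exact PySem.List.foldl_append_ite _ _ _ _

theorem pv_mem_colBlock (columns rows x y offset dx : Int) (m : Int × Int) :
    m ∈ pvColBlock columns rows x y offset dx ↔
      ¬ (x + dx < 0 ∨ x + dx ≥ columns) ∧
      ∃ dy, ((|dx| = offset ∧ -offset ≤ dy ∧ dy < offset + 1) ∨
             (¬ |dx| = offset ∧ (dy = -offset ∨ dy = offset))) ∧
        (0 ≤ y + dy ∧ y + dy < rows) ∧ m = (x + dx, y + dy) := by
  unfold pvColBlock
  by_cases h : x + dx < 0 ∨ x + dx ≥ columns
  · simp [h]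
  · simp only [h, if_false, List.mem_map, List.mem_filter, not_false_iff, true_and,
      decide_eq_true_eq]
    by_cases hd : |dx| = offset
    · rw [if_pos hd]
      simp only [PySem.List.mem_pyRange_one]
      constructor
      · rintro ⟨dy, ⟨⟨h1, h2⟩, hrow⟩, rfl⟩
        exact ⟨dy, Or.inl ⟨hd, h1, h2⟩, hrow, rfl⟩
      · rintro ⟨dy, (⟨-, h1, h2⟩ | ⟨hne, -⟩), hrow, rfl⟩
        · exact ⟨dy, ⟨⟨h1, h2⟩, hrow⟩, rfl⟩
        · exact absurd hd hne
    · rw [if_neg hd]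
      constructor
      · rintro ⟨dy, ⟨hr, hrow⟩, rfl⟩
        simp only [List.mem_cons, List.not_mem_nil, or_false] at hr
        exact ⟨dy, Or.inr ⟨hd, hr⟩, hrow, rfl⟩
      · rintro ⟨dy, (⟨he, -⟩ | ⟨-, hr⟩), hrow, rfl⟩
        · exact absurd he hd
        · exact ⟨dy, ⟨by simpa using hr, hrow⟩, rfl⟩

theorem pv_fst_of_mem_colBlock (columns rows x y offset dx : Int) (m : Int × Int)
    (h : m ∈ pvColBlock columns rows x y offset dx) : m.1 = x + dx := by
  rw [pv_mem_colBlock] at h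
  obtain ⟨-, dy, -, -, rfl⟩ := h
  rfl

theorem pv_colBlock_pairwise (columns rows x y offset dx : Int)
    (hdx : -offset ≤ dx ∧ dx < offset + 1) :
    (pvColBlock columns rows x y offset dx).Pairwise
      (fun a b => (toLex a : Lex (Int × Int)) < toLex b) := by
  unfold pvColBlock
  by_cases h : x + dx < 0 ∨ x + dx ≥ columns
  · simp [h]
  · simp only [h, if_false]
    rw [List.pairwise_map]
    apply List.Pairwise.filter
    by_cases hd : |dx| = offset
    · simp only [hd, if_true]
      exact (pv_pyRange_pairwise _ _).imp
        (by intro i j hij; rw [Prod.Lex.toLex_lt_toLex]; right; omega)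
    · simp only [hd, if_false]
      have ho : 0 < offset := by
        rcases hdx with ⟨h1, h2⟩
        rcases abs_cases dx with ⟨he, _⟩ | ⟨he, _⟩ <;> omega
      refine List.Pairwise.cons ?_ (List.Pairwise.cons (by simp) List.Pairwise.nil)
      intro b hb
      simp only [List.mem_singleton] at hb
      subst hb
      rw [Prod.Lex.toLex_lt_toLex]
      right
      omega

theorem pv_alt_pairwise (columns rows x y offset : Int) :
    (matrix_get_coords_cicle_alt columns rows x y offset).Pairwise
      (fun a b => (toLex a : Lex (Int × Int)) < toLex b) := by
  rw [pv_alt_eq_flatMap, List.pairwise_flatMap]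
  constructor
  · intro dx hdx
    exact pv_colBlock_pairwise columns rows x y offset dx
      (PySem.List.mem_pyRange_one.mp hdx)
  · refine (pv_pyRange_pairwise _ _).imp ?_
    intro dx1 dx2 h12 p hp q hq
    rw [Prod.Lex.toLex_lt_toLex]
    left
    rw [pv_fst_of_mem_colBlock _ _ _ _ _ _ _ hp, pv_fst_of_mem_colBlock _ _ _ _ _ _ _ hq]
    omega

theorem pv_mem_alt (columns rows x y offset : Int) (m : Int × Int) :
    m ∈ matrix_get_coords_cicle_alt columns rows x y offset ↔
      (0 ≤ m.1 ∧ m.1 < columns ∧ 0 ≤ m.2 ∧ m.2 < rows) ∧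
      (((m.2 = y + offset ∨ m.2 = y - offset) ∧ x - offset ≤ m.1 ∧ m.1 < x + offset + 1) ∨
       ((m.1 = x + offset ∨ m.1 = x - offset) ∧ y - offset ≤ m.2 ∧ m.2 < y + offset + 1)) := by
  rw [pv_alt_eq_flatMap, List.mem_flatMap]
  constructor
  · rintro ⟨dx, hdx, hm⟩
    rw [PySem.List.mem_pyRange_one] at hdx
    rw [pv_mem_colBlock] at hm
    obtain ⟨hcol, dy, hdy, hrow, rfl⟩ := hm
    dsimp only
    rcases hdy with ⟨he, h1, h2⟩ | ⟨he, (rfl | rfl)⟩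
    · constructor
      · omega
      · rcases abs_cases dx with ⟨heq, _⟩ | ⟨heq, _⟩
        · right; constructor; · left; omega
          omega
        · right; constructor; · right; omega
          omega
    · exact ⟨by omega, Or.inl ⟨Or.inr (by ring), by omega⟩⟩
    · exact ⟨by omega, Or.inl ⟨Or.inl (by ring), by omega⟩⟩
  · rintro ⟨hb, hring⟩
    refine ⟨m.1 - x, ?_, ?_⟩
    · rw [PySem.List.mem_pyRange_one]
      rcases hring with ⟨-, h1, h2⟩ | ⟨h1, h2⟩ <;> omega
    · rw [pv_mem_colBlock]
      refine ⟨by omega, m.2 - y, ?_, by omega, by simp⟩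
      by_cases hd : |m.1 - x| = offset
      · left
        refine ⟨hd, ?_⟩
        rcases hring with ⟨h1, h2, h3⟩ | ⟨h1, h2, h3⟩ <;> omega
      · right
        refine ⟨hd, ?_⟩
        rcases hring with ⟨h1, h2, h3⟩ | ⟨h1, h2, h3⟩
        · omega
        · exfalso
          rcases abs_cases (m.1 - x) with ⟨he, _⟩ | ⟨he, _⟩ <;> omega

theorem pv_mem_a_list (columns rows x y offset : Int) (m : Int × Int) :
    m ∈ PySem.Set.ofList
        (([x + offset, x - offset].foldl (fun s outer_column =>
            (PySem.List.pyRange (y - offset) (y + offset + 1)).foldl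
              (fun s intermediate_row => s.insert (outer_column, intermediate_row)) s)
          ([y + offset, y - offset].foldl (fun s outer_row =>
            (PySem.List.pyRange (x - offset) (x + offset + 1)).foldl
              (fun s intermediate_column => s.insert (intermediate_column, outer_row)) s)
            (Std.TreeSet.empty : Std.TreeSet (Int × Int) pvTupleCmp))).toList.filter
          (fun p => decide (¬ (p.1 < 0 ∨ p.2 < 0) ∧ ¬ (p.1 ≥ columns ∨ p.2 ≥ rows)))) ↔
      (0 ≤ m.1 ∧ m.1 < columns ∧ 0 ≤ m.2 ∧ m.2 < rows) ∧
      (((m.2 = y + offset ∨ m.2 = y - offset) ∧ x - offset ≤ m.1 ∧ m.1 < x + offset + 1) ∨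
       ((m.1 = x + offset ∨ m.1 = x - offset) ∧ y - offset ≤ m.2 ∧ m.2 < y + offset + 1)) := by
  rw [PySem.Set.mem_ofList, List.mem_filter, pv_mem_toList,
    pv_mem_foldl_ins2 _ _ (fun a b => (a, b)),
    pv_mem_foldl_ins2 _ _ (fun a b => (b, a))]
  simp only [pv_not_mem_empty, false_or, List.mem_cons, List.not_mem_nil,
    PySem.List.mem_pyRange_one, decide_eq_true_eq, or_false]
  constructor
  · rintro ⟨⟨a, ha, b, hb, rfl⟩ | ⟨a, ha, b, hb, rfl⟩, hbound⟩
    · exact ⟨by omega, Or.inl ⟨by tauto, by omega⟩⟩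
    · exact ⟨by omega, Or.inr ⟨by tauto, by omega⟩⟩
  · rintro ⟨hb, hring⟩
    refine ⟨?_, by omega⟩
    rcases hring with ⟨h1, h2⟩ | ⟨h1, h2⟩
    · exact Or.inl ⟨m.2, h1, m.1, h2, rfl⟩
    · exact Or.inr ⟨m.1, h1, m.2, h2, rfl⟩

-- unfolding A's port past its `let` bindings (a definitional equality)
theorem pv_a_unfold (columns rows x y offset : Int) :
    matrix_get_coords_cicle columns rows x y offset =
      PySem.List.sorted2
        (PySem.Set.ofList
          (([x + offset, x - offset].foldl (fun s outer_column =>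
              (PySem.List.pyRange (y - offset) (y + offset + 1)).foldl
                (fun s intermediate_row => s.insert (outer_column, intermediate_row)) s)
            ([y + offset, y - offset].foldl (fun s outer_row =>
              (PySem.List.pyRange (x - offset) (x + offset + 1)).foldl
                (fun s intermediate_column => s.insert (intermediate_column, outer_row)) s)
              (Std.TreeSet.empty : Std.TreeSet (Int × Int) pvTupleCmp))).toList.filter
            (fun p => decide (¬ (p.1 < 0 ∨ p.2 < 0) ∧ ¬ (p.1 ≥ columns ∨ p.2 ≥ rows)))))
        Prod.fst Prod.snd := rfl

-- ===== VERDICT (by name: the statement is the Claim_ definition above) =====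
theorem matrix_get_coords_cicle_spec : Claim_equal_matrix_get_coords_cicle := by
  intro columns rows x y offset _
  unfold Spec_matrix_get_coords_cicle
  rw [pv_a_unfold, pv_sorted2_eq_sorted_lex]
  refine PySem.List.sorted_eq_of_perm_of_pairwise_lt _
    (matrix_get_coords_cicle_alt columns rows x y offset)
    (fun p => (toLex p : Lex (Int × Int))) ?_ (pv_alt_pairwise columns rows x y offset)
  rw [List.perm_ext_iff_of_nodup
    ((pv_alt_pairwise columns rows x y offset).imp
      (fun h heq => by rw [heq] at h; exact lt_irrefl _ h))
    (PySem.Set.nodup_ofList _)]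
  intro m
  rw [pv_mem_alt, pv_mem_a_list]
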